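-- pv_equiv track=rewrite | github.com/yiyuan-he/catchtest | catchtest/core/test_runner.py | _extract_failure_info
-- ===== SOURCE A (Python) =====
-- def _extract_failure_info(output: str) -> tuple[str | None, str | None]:
--     """Extract failure message and traceback from test output."""
--     if not output:
--         return None, None
--
--     lines = output.split("\n")
--     failure_msg = None
--     traceback_lines: list[str] = []
--     in_traceback = False
--
--     for line in lines:
--         if "FAILED" in line or "ERRORS" in line or "AssertionError" in line:
--             failure_msg = line.strip()
--         if "Traceback" in line or in_traceback:
--             in_traceback = True
--             traceback_lines.append(line)
--         if line.startswith("E ") and not failure_msg: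
--             failure_msg = line.strip()
--
--     traceback = "\n".join(traceback_lines) if traceback_lines else None
--     return failure_msg, traceback
-- ===== SOURCE B (Python) =====
-- def _extract_failure_info(output: str) -> tuple[str | None, str | None]:
--     """Extract failure message and traceback from test output (two separate passes)."""
--     if not output:
--         return None, None
--
--     lines = output.split("\n")
--
--     keyword_lines = [
--         l for l in lines
--         if "FAILED" in l or "ERRORS" in l or "AssertionError" in l
--     ]
--     if keyword_lines:
--         failure_msg = keyword_lines[-1].strip()
--     else:
--         failure_msg = next((l.strip() for l in lines if l.startswith("E ")), None)
--
--     traceback = None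
--     for i, l in enumerate(lines):
--         if "Traceback" in l:
--             traceback = "\n".join(lines[i:])
--             break
--
--     return failure_msg, traceback
-- ===== Notes on version B (the rewrite author's own statement) =====
-- stated objective: simpler
-- what changed: Replaced A's single interleaved loop with mutable failure_msg/in_traceback state by two independent passes: the last keyword line (else the first 'E '-prefixed line) for the message, and the index of the first 'Traceback' line joined with the tail for the traceback.
import Mathlib
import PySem

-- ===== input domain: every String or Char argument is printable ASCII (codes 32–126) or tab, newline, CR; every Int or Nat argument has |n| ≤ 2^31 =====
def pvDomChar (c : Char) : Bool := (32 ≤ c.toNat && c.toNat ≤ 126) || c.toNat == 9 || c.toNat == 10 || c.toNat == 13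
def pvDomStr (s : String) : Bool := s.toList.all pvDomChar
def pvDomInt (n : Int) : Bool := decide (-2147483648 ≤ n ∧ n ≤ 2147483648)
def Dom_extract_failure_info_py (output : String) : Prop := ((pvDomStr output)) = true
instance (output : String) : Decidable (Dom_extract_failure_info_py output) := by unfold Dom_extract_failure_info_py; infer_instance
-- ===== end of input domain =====

-- B replaces A's single interleaved loop (mutable failure_msg / in_traceback flag) by
-- independent passes: last keyword line (fallback first "E " line) for the message, and
-- first "Traceback" index + tail-join for the traceback; objective: simpler.

-- shared line predicates (the same literal tests both Pythons perform)
def pvKw (line : String) : Bool :=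
  PySem.Str.isIn "FAILED" line || PySem.Str.isIn "ERRORS" line || PySem.Str.isIn "AssertionError" line
def pvTb (line : String) : Bool := PySem.Str.isIn "Traceback" line
def pvE (line : String) : Bool := PySem.Str.startswith line "E "
-- Python truthiness of the Optional[str] failure_msg ('not failure_msg')
def pvFalsy : Option String → Bool
  | none => true
  | some s => s == ""

-- ===== PORT A =====
-- the body of A's single for-loop, on the state (failure_msg, traceback_lines, in_traceback)
def pvLoopA (st : Option String × List String × Bool) (line : String) :
    Option String × List String × Bool :=
  let fm := if pvKw line then some (PySem.Str.strip line) else st.1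
  let tb := if pvTb line || st.2.2 then (st.2.1 ++ [line], true) else (st.2.1, st.2.2)
  let fm := if pvE line && pvFalsy fm then some (PySem.Str.strip line) else fm
  (fm, tb)

def extract_failure_info_py (output : String) : Option String × Option String :=
  if output == "" then (none, none)
  else
    let lines := (PySem.Str.split? output "\n").getD []   -- sep "\n" ≠ "", so split? is `some`
    let st := lines.foldl pvLoopA (none, [], false)
    (st.1, if st.2.1 == [] then none else some (PySem.Str.join "\n" st.2.1))

-- ===== PORT B =====
def extract_failure_info_py_alt (output : String) : Option String × Option String :=
  if output == "" then (none, none)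
  else
    let lines := (PySem.Str.split? output "\n").getD []
    let failure_msg :=
      match (lines.filter pvKw).getLast? with
      | some l => some (PySem.Str.strip l)
      | none => (lines.find? pvE).map PySem.Str.strip
    let traceback :=
      match lines.findIdx? pvTb with
      | some i => some (PySem.Str.join "\n" (lines.drop i))
      | none => none
    (failure_msg, traceback)

-- ===== PRECONDITION & SPEC =====
def Spec_extract_failure_info_py (output : String) (out : Option String × Option String) : Prop := out = extract_failure_info_py_alt output
instance (output : String) (out : Option String × Option String) : Decidable (Spec_extract_failure_info_py output out) := by unfold Spec_extract_failure_info_py; infer_instance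

-- ===== CLAIM (what is proved, stated in full; the proofs are below) =====
def Claim_equal_extract_failure_info_py : Prop := ∀ (output : String), Dom_extract_failure_info_py output → Spec_extract_failure_info_py output (extract_failure_info_py output)

-- ===== LEMMAS AND PROOFS =====

-- the failure_msg and traceback components of A's loop evolve independently
def pvStepF (fm : Option String) (line : String) : Option String :=
  let fm := if pvKw line then some (PySem.Str.strip line) else fm
  if pvE line && pvFalsy fm then some (PySem.Str.strip line) else fm

def pvStepT (st : List String × Bool) (line : String) : List String × Bool :=
  if pvTb line || st.2 then (st.1 ++ [line], true) else st

lemma pvLoopA_split (ls : List String) (fm : Option String) (t : List String) (b : Bool) :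
    List.foldl pvLoopA (fm, t, b) ls =
      (List.foldl pvStepF fm ls, List.foldl pvStepT (t, b) ls) := by
  induction ls generalizing fm t b with
  | nil => rfl
  | cons l ls ih =>
      simp only [List.foldl_cons]
      rw [show pvLoopA (fm, t, b) l = (pvStepF fm l, pvStepT (t, b) l) from by
        simp only [pvLoopA, pvStepF, pvStepT]]
      exact ih _ _ _

-- a stripped line keeping a non-whitespace character is non-empty
lemma pvStrip_ne_empty {s : String} {c : Char} (hc : c ∈ s.toList)
    (hws : PySem.Chars.isspace c = false) : PySem.Str.strip s ≠ "" := by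
  intro h
  have h' : PySem.Chars.strip s.toList = [] := by
    have := congrArg String.toList h
    simpa using this
  -- c survives lstrip
  have hmem1 : c ∈ PySem.Chars.lstrip s.toList := by
    have hsplit := List.takeWhile_append_dropWhile (p := PySem.Chars.isspace) (l := s.toList)
    have : c ∈ List.takeWhile PySem.Chars.isspace s.toList ∨
        c ∈ List.dropWhile PySem.Chars.isspace s.toList := by
      rw [← List.mem_append, hsplit]; exact hc
    rcases this with h1 | h1
    · exact absurd (List.mem_takeWhile_imp h1) (by simp [hws])
    · simpa [PySem.Chars.lstrip] using h1
  -- and survives rstrip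
  have h'' : List.dropWhile PySem.Chars.isspace (PySem.Chars.lstrip s.toList).reverse = [] := by
    have := h'
    simp only [PySem.Chars.strip, PySem.Chars.rstrip, List.reverse_eq_nil_iff] at this
    exact this
  have := (List.dropWhile_eq_nil_iff.mp h'') c (by simpa using hmem1)
  simp [hws] at this

lemma pvStrip_ne_of_kw {l : String} (h : pvKw l = true) : PySem.Str.strip l ≠ "" := by
  simp only [pvKw, Bool.or_eq_true, PySem.Str.isIn_iff_infix] at h
  rcases h with (h | h) | h
  · exact pvStrip_ne_empty (h.subset (by decide : 'F' ∈ "FAILED".toList)) (by decide)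
  · exact pvStrip_ne_empty (h.subset (by decide : 'E' ∈ "ERRORS".toList)) (by decide)
  · exact pvStrip_ne_empty (h.subset (by decide : 'A' ∈ "AssertionError".toList)) (by decide)

lemma pvStrip_ne_of_E {l : String} (h : pvE l = true) : PySem.Str.strip l ≠ "" := by
  have h' : "E ".toList <+: l.toList := by
    have := h; simp only [pvE, PySem.Str.startswith_eq, PySem.Chars.startswith_iff] at this
    exact this
  exact pvStrip_ne_empty (h'.subset (by decide : 'E' ∈ "E ".toList)) (by decide)

lemma pvFalsy_some_ne {s : String} (h : s ≠ "") : pvFalsy (some s) = false := by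
  simp [pvFalsy, h]

-- characterisation of A's failure_msg loop: last keyword line wins, first "E " line only
-- when the accumulator can never have been set
lemma pvFoldF_char (ls : List String) (fm0 : Option String) (h0 : fm0 ≠ some "") :
    List.foldl pvStepF fm0 ls =
      (match (ls.filter pvKw).getLast? with
       | some l => some (PySem.Str.strip l)
       | none =>
         match fm0 with
         | some s => some s
         | none => (ls.find? pvE).map PySem.Str.strip) := by
  induction ls generalizing fm0 with
  | nil => cases fm0 <;> simp
  | cons l ls ih =>
      simp only [List.foldl_cons]
      by_cases hkw : pvKw l = true
      · have hstep : pvStepF fm0 l = some (PySem.Str.strip l) := by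
          simp [pvStepF, hkw, pvFalsy_some_ne (pvStrip_ne_of_kw hkw)]
        rw [hstep, ih _ (by simp [pvStrip_ne_of_kw hkw])]
        simp only [List.filter_cons, hkw, if_pos, List.getLast?_cons]
        cases hlast : (ls.filter pvKw).getLast? <;> simp
      · have hkw' : pvKw l = false := by simpa using hkw
        by_cases hE : pvE l = true
        · cases fm0 with
          | none =>
              have hstep : pvStepF none l = some (PySem.Str.strip l) := by
                simp [pvStepF, hkw', hE, pvFalsy]
              rw [hstep, ih _ (by simp [pvStrip_ne_of_E hE])]
              simp [hkw', hE]
          | some s =>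
              have hs : s ≠ "" := by intro hs; exact h0 (by rw [hs])
              have hstep : pvStepF (some s) l = some s := by
                simp [pvStepF, hkw', pvFalsy_some_ne hs]
              rw [hstep, ih _ h0]
              simp [hkw']
        · have hE' : pvE l = false := by simpa using hE
          have hstep : pvStepF fm0 l = fm0 := by
            simp [pvStepF, hkw', hE']
          rw [hstep, ih _ h0]
          simp [hkw', hE']

-- characterisation of A's traceback loop
lemma pvFoldT_true (ls : List String) (acc : List String) :
    List.foldl pvStepT (acc, true) ls = (acc ++ ls, true) := by
  induction ls generalizing acc with
  | nil => simp
  | cons l ls ih => simp [pvStepT, ih]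

lemma pvFoldT_false (ls : List String) :
    List.foldl pvStepT ([], false) ls =
      (match ls.findIdx? pvTb with
       | some i => (ls.drop i, true)
       | none => ([], false)) := by
  induction ls with
  | nil => simp
  | cons l ls ih =>
      by_cases hl : pvTb l = true
      · simp only [List.foldl_cons, pvStepT, hl, Bool.true_or, if_pos]
        rw [pvFoldT_true]
        simp [List.findIdx?_cons, hl]
      · have hl' : pvTb l = false := by simpa using hl
        simp only [List.foldl_cons, pvStepT, hl', Bool.false_or, Bool.false_eq_true, if_false]
        rw [ih]
        cases hidx : ls.findIdx? pvTb <;> simp [List.findIdx?_cons, hl', hidx]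

lemma pvDrop_ne_nil {ls : List String} {i : Nat} (h : ls.findIdx? pvTb = some i) :
    ls.drop i ≠ [] := by
  have hi := (List.findIdx?_eq_some_iff_findIdx_eq.mp h).1
  simp [List.drop_eq_nil_iff]
  omega

-- ===== VERDICT (by name: the statement is the Claim_ definition above) =====
theorem extract_failure_info_py_spec : Claim_equal_extract_failure_info_py := by
  intro output _
  unfold Spec_extract_failure_info_py extract_failure_info_py extract_failure_info_py_alt
  by_cases h0 : output == ""
  · simp [h0]
  · simp only [h0, Bool.false_eq_true, if_false]
    set lines := (PySem.Str.split? output "\n").getD [] with hlines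
    rw [pvLoopA_split, pvFoldF_char lines none (by simp), pvFoldT_false]
    refine Prod.ext ?_ ?_
    · rfl
    · cases hidx : lines.findIdx? pvTb with
      | none => simp
      | some i =>
          have hne := pvDrop_ne_nil hidx
          simp [hne]
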